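-- pv_equiv track=rewrite | github.com/marques-j-robinson/advent-of-code | Events/2015/day05.py | repeat_every_other_letter
-- ===== SOURCE A (Python) =====
-- def repeat_every_other_letter(s):
--     res = False
--     for idx, l in enumerate(s):
--         if idx > 1:
--             prev = s[idx - 2]
--             if prev == l:
--                 res = True
--     return res
-- ===== SOURCE B (Python) =====
-- def repeat_every_other_letter(s):
--     positions = {}
--     for i, c in enumerate(s):
--         positions.setdefault(c, set()).add(i)
--     return any(i + 2 in positions.get(c, set()) for i, c in enumerate(s))
-- ===== Notes on version B (the rewrite author's own statement) =====
-- stated objective: alternative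
-- what changed: Replaced A's flag loop with direct lookback s[idx-2] by a two-stage index algorithm: one pass builds a dictionary mapping each character to the set of its positions, then the answer is whether any position i of a character c has i+2 also in c's position set.
import Mathlib
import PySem

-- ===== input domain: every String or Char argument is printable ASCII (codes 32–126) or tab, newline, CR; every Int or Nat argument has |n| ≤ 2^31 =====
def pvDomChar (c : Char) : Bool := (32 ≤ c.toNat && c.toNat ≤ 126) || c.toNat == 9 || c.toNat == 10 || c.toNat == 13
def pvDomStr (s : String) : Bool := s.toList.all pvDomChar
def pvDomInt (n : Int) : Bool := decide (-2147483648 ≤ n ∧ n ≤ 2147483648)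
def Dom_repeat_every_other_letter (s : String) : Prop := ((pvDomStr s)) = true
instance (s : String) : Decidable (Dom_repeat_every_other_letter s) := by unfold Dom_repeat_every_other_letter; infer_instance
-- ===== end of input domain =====

-- B builds a positions index (char -> set of indices) in one pass, then answers by membership
-- queries i+2 ∈ positions[c] — an index-lookup algorithm instead of A's flag loop with direct lookback.


-- ===== PORT A =====
def repeat_every_other_letter (s : String) : Bool :=
  (PySem.List.enumerate s.toList 0).foldl
    (fun (res : Bool) (p : Int × Char) =>
      if p.1 > 1 then
        match PySem.List.pyGet? s.toList (p.1 - 2) with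
        | some prev => if prev == p.2 then true else res
        | none => res
      else res) false

-- ===== PORT B =====
def repeat_every_other_letter_alt (s : String) : Bool :=
  let positions : PySem.Dict Char (PySem.Set Int) :=
    (PySem.List.enumerate s.toList 0).foldl
      (fun d p => d.modify p.2 PySem.Set.empty (fun ps => PySem.Set.add ps p.1))
      PySem.Dict.empty
  (PySem.List.enumerate s.toList 0).any
    (fun p => (positions.getD p.2 PySem.Set.empty).contains (p.1 + 2))

-- ===== PRECONDITION & SPEC =====
def Spec_repeat_every_other_letter (s : String) (out : Bool) : Prop := out = repeat_every_other_letter_alt s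
instance (s : String) (out : Bool) : Decidable (Spec_repeat_every_other_letter s out) := by unfold Spec_repeat_every_other_letter; infer_instance

-- ===== CLAIM =====
def Claim_equal_repeat_every_other_letter : Prop := ∀ (s : String), Dom_repeat_every_other_letter s → Spec_repeat_every_other_letter s (repeat_every_other_letter s)

-- ===== LEMMAS AND PROOFS =====

-- A's loop body is 'set the flag if the condition holds', i.e. an if-then-true-else step.
theorem pvStep_eq (l : List Char) :
    (fun (res : Bool) (p : Int × Char) =>
      if p.1 > 1 then
        match PySem.List.pyGet? l (p.1 - 2) with
        | some prev => if prev == p.2 then true else res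
        | none => res
      else res)
    = (fun res p => if (decide (p.1 > 1) && (PySem.List.pyGet? l (p.1 - 2) == some p.2)) then true else res) := by
  funext res p
  by_cases h : p.1 > 1
  · simp only [h, if_pos, decide_true, Bool.true_and]
    cases hg : PySem.List.pyGet? l (p.1 - 2) with
    | none => simp
    | some prev =>
      by_cases he : prev = p.2 <;> simp [he]
  · simp [h]

-- A's result is 'some character equals the one two positions later'.
theorem pvA_iff (l : List Char) :
    ((PySem.List.enumerate l 0).foldl
      (fun (res : Bool) (p : Int × Char) =>
        if p.1 > 1 then
          match PySem.List.pyGet? l (p.1 - 2) with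
          | some prev => if prev == p.2 then true else res
          | none => res
        else res) false) = true
    ↔ ∃ k, k + 2 < l.length ∧ l[k]? = l[k + 2]? := by
  rw [pvStep_eq, PySem.List.foldl_if_true_eq, Bool.false_or]
  simp only [List.any_eq_true]
  constructor
  · rintro ⟨p, hmem, hp⟩
    rw [PySem.List.mem_enumerate_iff] at hmem
    obtain ⟨k, hk, rfl⟩ := hmem
    simp only [zero_add, Bool.and_eq_true, decide_eq_true_eq, beq_iff_eq] at hp
    obtain ⟨hk2, hget⟩ := hp
    have hk2' : 2 ≤ k := by omega
    have hcast : (k : Int) - 2 = ((k - 2 : Nat) : Int) := by omega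
    rw [hcast, PySem.List.pyGet?_natCast] at hget
    refine ⟨k - 2, by omega, ?_⟩
    rw [hget]
    have : k - 2 + 2 = k := by omega
    rw [this, List.getElem?_eq_getElem hk]
  · rintro ⟨k, hk, hget⟩
    have hk' : k + 2 < l.length := hk
    rw [List.getElem?_eq_getElem (by omega), List.getElem?_eq_getElem hk'] at hget
    refine ⟨(((k + 2 : Nat) : Int), l[k + 2]), ?_, ?_⟩
    · rw [PySem.List.mem_enumerate_iff]
      exact ⟨k + 2, hk', by simp⟩
    · simp only [Bool.and_eq_true, decide_eq_true_eq, beq_iff_eq]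
      refine ⟨by push_cast; omega, ?_⟩
      have hcast : ((k + 2 : Nat) : Int) - 2 = ((k : Nat) : Int) := by omega
      rw [hcast, PySem.List.pyGet?_natCast, List.getElem?_eq_getElem (by omega)]
      exact congrArg some (Option.some.inj hget)

-- Invariant of B's index-building fold: membership in positions[c] describes exactly
-- the indices (offset by the enumeration start) at which c occurs.
theorem pvInv (l : List Char) (st : Int) (d : PySem.Dict Char (PySem.Set Int)) (c : Char) (i : Int) :
    (i ∈ ((PySem.List.enumerate l st).foldl
      (fun d (p : Int × Char) => d.modify p.2 PySem.Set.empty (fun ps => PySem.Set.add ps p.1)) d).getD c PySem.Set.empty)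
    ↔ i ∈ d.getD c PySem.Set.empty ∨ ∃ k, ∃ _ : k < l.length, i = st + k ∧ l[k] = c := by
  induction l generalizing st d with
  | nil => simp [PySem.List.enumerate]
  | cons x xs ih =>
    rw [PySem.List.enumerate_cons]
    simp only [List.foldl_cons]
    rw [ih]
    by_cases hc : c = x
    · subst hc
      rw [PySem.Dict.getD_modify_self, PySem.Set.mem_add]
      constructor
      · rintro (⟨h | h⟩ | ⟨k, hk, hi, hx⟩)
        · exact Or.inl h
        · exact Or.inr ⟨0, by simp, by simpa using h, rfl⟩
        · exact Or.inr ⟨k + 1, by simp only [List.length_cons]; omega, by push_cast; omega, by simpa using hx⟩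
      · rintro (h | ⟨k, hk, hi, hx⟩)
        · exact Or.inl (Or.inl h)
        · cases k with
          | zero => exact Or.inl (Or.inr (by simpa using hi))
          | succ k => exact Or.inr ⟨k, by simp only [List.length_cons] at hk; omega, by push_cast at hi ⊢; omega, by simpa using hx⟩
    · rw [PySem.Dict.getD_modify_of_ne _ _ _ hc]
      constructor
      · rintro (h | ⟨k, hk, hi, hx⟩)
        · exact Or.inl h
        · exact Or.inr ⟨k + 1, by simp only [List.length_cons]; omega, by push_cast; omega, by simpa using hx⟩
      · rintro (h | ⟨k, hk, hi, hx⟩)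
        · exact Or.inl h
        · cases k with
          | zero =>
            simp only [List.getElem_cons_zero] at hx
            exact absurd hx.symm hc
          | succ k => exact Or.inr ⟨k, by simp only [List.length_cons] at hk; omega, by push_cast at hi ⊢; omega, by simpa using hx⟩

-- B's result is the same characterisation.
theorem pvB_iff (l : List Char) :
    ((PySem.List.enumerate l 0).any
      (fun (p : Int × Char) =>
        (((PySem.List.enumerate l 0).foldl
            (fun d (p : Int × Char) => d.modify p.2 PySem.Set.empty (fun ps => PySem.Set.add ps p.1))
            PySem.Dict.empty).getD p.2 PySem.Set.empty).contains (p.1 + 2))) = true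
    ↔ ∃ k, k + 2 < l.length ∧ l[k]? = l[k + 2]? := by
  simp only [List.any_eq_true]
  constructor
  · rintro ⟨p, hmem, hp⟩
    rw [PySem.List.mem_enumerate_iff] at hmem
    obtain ⟨k, hk, rfl⟩ := hmem
    simp only [PySem.Set.contains_eq_listContains, List.contains_eq_mem, decide_eq_true_eq] at hp
    rw [pvInv] at hp
    rcases hp with h | ⟨k', hk', hi, hx⟩
    · simp [PySem.Dict.getD, PySem.Dict.get?, PySem.Dict.empty, PySem.Set.empty] at h
    · have hkk : k' = k + 2 := by simp only [zero_add] at hi; omega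
      subst hkk
      refine ⟨k, by omega, ?_⟩
      rw [List.getElem?_eq_getElem hk, List.getElem?_eq_getElem hk', hx]
  · rintro ⟨k, hk, hget⟩
    rw [List.getElem?_eq_getElem (by omega), List.getElem?_eq_getElem hk] at hget
    refine ⟨((k : Int), l[k]), ?_, ?_⟩
    · rw [PySem.List.mem_enumerate_iff]
      exact ⟨k, by omega, by simp⟩
    · simp only [PySem.Set.contains_eq_listContains, List.contains_eq_mem, decide_eq_true_eq]
      rw [pvInv]
      exact Or.inr ⟨k + 2, hk, by push_cast; ring, (Option.some.inj hget).symm⟩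

-- ===== VERDICT =====
theorem repeat_every_other_letter_spec : Claim_equal_repeat_every_other_letter := by
  intro s _
  unfold Spec_repeat_every_other_letter repeat_every_other_letter repeat_every_other_letter_alt
  rw [Bool.eq_iff_iff, pvA_iff s.toList, pvB_iff s.toList]
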